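-- pv_equiv track=rewrite | github.com/Noircoda/algorithm_final | 1/1(b).py | has_source_vertex
-- ===== SOURCE A (Python) =====
-- from collections import deque
--
-- def has_source_vertex(graph):
--     in_degree = {v: 0 for v in graph}
--     queue = deque()
--
--     # 計算每個頂點的in-degree
--     for v in graph:
--         for neighbor in graph[v]:
--             in_degree[neighbor] += 1
--
--     # 將in-degree為 0 的頂點加入佇列
--     for v in graph:
--         if in_degree[v] == 0:
--             queue.append(v)
--
--     sources = set()
--
--     # 拓撲排序
--     while queue:
--         vertex = queue.popleft()
--         sources.add(vertex)
--
--         for neighbor in graph[vertex]: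
--             in_degree[neighbor] -= 1
--             if in_degree[neighbor] == 0:
--                 queue.append(neighbor)
--
--     return len(sources) > 0
-- ===== SOURCE B (Python) =====
-- def has_source_vertex(graph):
--     in_degree = dict.fromkeys(graph, 0)
--     for ns in graph.values():
--         for n in ns:
--             in_degree[n] += 1
--     return 0 in in_degree.values()
-- ===== Notes on version B (the rewrite author's own statement) =====
-- stated objective: simpler
-- what changed: B keeps the in-degree counting pass but deletes A's queue, sources set and the entire topological-sort while-loop, returning directly whether any in-degree is 0 (the BFS propagation cannot change whether 'sources' ends up non-empty).
import Mathlib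
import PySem

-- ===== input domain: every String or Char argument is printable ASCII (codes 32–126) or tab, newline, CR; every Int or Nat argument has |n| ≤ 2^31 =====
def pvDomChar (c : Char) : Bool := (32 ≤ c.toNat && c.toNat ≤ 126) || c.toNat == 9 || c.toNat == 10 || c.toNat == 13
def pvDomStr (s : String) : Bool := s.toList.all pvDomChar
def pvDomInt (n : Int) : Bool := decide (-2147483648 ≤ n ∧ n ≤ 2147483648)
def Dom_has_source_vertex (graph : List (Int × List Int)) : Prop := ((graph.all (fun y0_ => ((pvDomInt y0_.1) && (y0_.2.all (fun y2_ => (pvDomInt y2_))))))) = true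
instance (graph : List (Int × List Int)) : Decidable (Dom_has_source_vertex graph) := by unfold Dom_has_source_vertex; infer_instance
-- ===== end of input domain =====

-- B keeps the in-degree pass but drops A's queue, sources set and whole topological-sort loop,
-- returning directly whether some in-degree is 0; proved equal on every admitted input.

-- ===== PORT A =====
-- A's while-loop, with fuel: each vertex is enqueued at most once, so graph.length + 1 steps
-- always suffice; on fuel exhaustion we return the current 'len(sources) > 0' (the result is
-- already fixed once the first vertex has been popped, see pvLoopA_true below).
def pvLoopA (g : PySem.Dict Int (List Int)) : Nat → List Int → PySem.Dict Int Int → PySem.Set Int → Bool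
  | 0, _, _, sources => decide (0 < sources.length)
  | _ + 1, [], _, sources => decide (0 < sources.length)
  | fuel + 1, v :: qs, indeg, sources =>
    let sources' := PySem.Set.add sources v
    let st := (g.getD v []).foldl
      (fun (st : PySem.Dict Int Int × List Int) n =>
        let d := st.1.modify n 0 (· - 1)
        if d.getD n 0 == 0 then (d, st.2 ++ [n]) else (d, st.2)) (indeg, qs)
    pvLoopA g fuel st.2 st.1 sources'

def has_source_vertex (graph : List (Int × List Int)) : Bool :=
  let g : PySem.Dict Int (List Int) := PySem.Dict.mk graph
  let indeg0 := g.keys.foldl (fun d v => d.insert v 0) PySem.Dict.empty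
  let indeg := g.keys.foldl
      (fun d v => (g.getD v []).foldl (fun d n => d.modify n 0 (· + 1)) d) indeg0
  let queue := g.keys.filter (fun v => indeg.getD v 0 == 0)
  pvLoopA g (graph.length + 1) queue indeg PySem.Set.empty

-- ===== PORT B =====
def has_source_vertex_alt (graph : List (Int × List Int)) : Bool :=
  let g : PySem.Dict Int (List Int) := PySem.Dict.mk graph
  let indeg := g.values.foldl
      (fun d ns => ns.foldl (fun d n => d.modify n 0 (· + 1)) d)
      (g.keys.foldl (fun d v => d.insert v 0) PySem.Dict.empty)
  decide ((0 : Int) ∈ indeg.values)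

-- ===== PRECONDITION & SPEC =====
-- Pre_ excludes (i) association lists with duplicate keys — a Python dict cannot carry them, so
-- they represent no dict input of A — and (ii) graphs with an edge to a non-key vertex, on which
-- A (and B, which keeps the same counting pass) raises KeyError at 'in_degree[...] += 1'.
def Pre_has_source_vertex (graph : List (Int × List Int)) : Prop :=
  (graph.map Prod.fst).Nodup ∧
  ∀ p ∈ graph, ∀ n ∈ p.2, n ∈ graph.map Prod.fst
instance (graph : List (Int × List Int)) : Decidable (Pre_has_source_vertex graph) := by
  unfold Pre_has_source_vertex; infer_instance

def pvWitness_has_source_vertex : (List (Int × List Int)) := [(1, [2]), (2, [2]), (3, [])]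

def Spec_has_source_vertex (graph : List (Int × List Int)) (out : Bool) : Prop := out = has_source_vertex_alt graph
instance (graph : List (Int × List Int)) (out : Bool) : Decidable (Spec_has_source_vertex graph out) := by unfold Spec_has_source_vertex; infer_instance

-- ===== CLAIM (what is proved, stated in full; the proofs are below) =====
def Claim_equal_has_source_vertex : Prop := ∀ (graph : List (Int × List Int)), Dom_has_source_vertex graph → Pre_has_source_vertex graph → Spec_has_source_vertex graph (has_source_vertex graph)

-- ===== LEMMAS AND PROOFS =====

lemma set_add_ne_nil (s : PySem.Set Int) (x : Int) : PySem.Set.add s x ≠ [] := by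
  simp only [PySem.Set.add]
  split
  · intro h; subst h; simp [PySem.Set.contains] at *
  · simp

lemma pvLoopA_true (g : PySem.Dict Int (List Int)) :
    ∀ (fuel : Nat) (q : List Int) (indeg : PySem.Dict Int Int) (sources : PySem.Set Int),
      sources ≠ [] → pvLoopA g fuel q indeg sources = true := by
  intro fuel
  induction fuel with
  | zero => intro q indeg sources h; simp [pvLoopA, List.length_pos_iff, h]
  | succ n ih =>
    intro q indeg sources h
    cases q with
    | nil => simp [pvLoopA, List.length_pos_iff, h]
    | cons v qs => exact ih _ _ _ (set_add_ne_nil sources v)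

-- an insert-zero loop keeps every lookup-with-default-0 at 0
lemma getD_foldl_insert_zero (x : Int) :
    ∀ (ks : List Int) (d : PySem.Dict Int Int), d.getD x 0 = 0 →
      (ks.foldl (fun d v => d.insert v 0) d).getD x 0 = 0 := by
  intro ks
  induction ks with
  | nil => intro d h; simpa using h
  | cons k ks ih =>
    intro d h
    refine ih _ ?_
    rw [PySem.Dict.getD_insert]
    split <;> simp [h]

-- a fold of inner folds over h v is a fold over the flattened list
lemma foldl_foldl_eq_flatMap {α β γ : Type} (f : β → α → β) (h : γ → List α) :
    ∀ (ks : List γ) (d : β),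
      ks.foldl (fun d v => (h v).foldl f d) d = (ks.flatMap h).foldl f d := by
  intro ks
  induction ks with
  | nil => intro d; rfl
  | cons k ks ih => intro d; simp [List.flatMap_cons, List.foldl_append, ih]

-- A's port, reduced to "some key has in-degree 0 in the flattened edge list L"
lemma pvMainAuxA (g : PySem.Dict Int (List Int)) (indeg : PySem.Dict Int Int) (L : List Int)
    (hcount : ∀ x : Int, indeg.getD x 0 = (L.count x : Int)) (fuel : Nat) :
    pvLoopA g (fuel + 1) (g.keys.filter (fun v => indeg.getD v 0 == 0)) indeg PySem.Set.empty
      = decide (∃ v ∈ g.keys, L.count v = 0) := by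
  rcases hq : g.keys.filter (fun v => indeg.getD v 0 == 0) with _ | ⟨v, qs⟩
  · -- no zero-in-degree key: A's queue is empty, sources stays empty → false
    have hfalse : pvLoopA g (fuel + 1) ([] : List Int) indeg PySem.Set.empty = false := by
      simp [pvLoopA]
    rw [hfalse]
    symm
    simp only [decide_eq_false_iff_not, not_exists, not_and]
    intro v hv h0
    have : v ∈ g.keys.filter (fun v => indeg.getD v 0 == 0) :=
      List.mem_filter.mpr ⟨hv, by simp [hcount v, h0]⟩
    rw [hq] at this
    exact absurd this List.not_mem_nil
  · -- v has in-degree 0: A pops it into sources and must return true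
    have hA : pvLoopA g (fuel + 1) (v :: qs) indeg PySem.Set.empty = true := by
      rw [pvLoopA]
      exact pvLoopA_true g _ _ _ _ (set_add_ne_nil PySem.Set.empty v)
    rw [hA]
    have hvmem : v ∈ g.keys.filter (fun v => indeg.getD v 0 == 0) := by
      rw [hq]; exact List.mem_cons_self
    obtain ⟨hvk, hvz⟩ := List.mem_filter.mp hvmem
    have hzero : L.count v = 0 := by
      have hcv := hcount v
      simp only [beq_iff_eq] at hvz
      rw [hvz] at hcv
      exact_mod_cast hcv.symm
    symm
    simp only [decide_eq_true_iff]
    exact ⟨v, hvk, hzero⟩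

-- ===== VERDICT (by name: the statement is the Claim_ definition above) =====
theorem has_source_vertex_spec : Claim_equal_has_source_vertex := by
  intro graph _ hpre
  obtain ⟨hnd, hcl⟩ := hpre
  unfold Spec_has_source_vertex has_source_vertex has_source_vertex_alt
  simp only []
  have hndk : (PySem.Dict.mk graph).keys.Nodup := by
    simpa [PySem.Dict.keys] using hnd
  -- the flattened edge list, and A's iteration of it through graph[v]
  have hvals : (PySem.Dict.mk graph).values.flatMap id
      = (PySem.Dict.mk graph).keys.flatMap (fun v => (PySem.Dict.mk graph).getD v []) := by
    rw [PySem.Dict.values_eq_map_keys (PySem.Dict.mk graph) hndk []]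
    simp [List.flatMap_map]
  -- both ports build the same in-degree dict: the fold over the flattened list
  have hfoldA : (PySem.Dict.mk graph).keys.foldl
      (fun d v => ((PySem.Dict.mk graph).getD v []).foldl (fun d n => d.modify n 0 (· + 1)) d)
      ((PySem.Dict.mk graph).keys.foldl (fun d v => d.insert v 0) (PySem.Dict.empty : PySem.Dict Int Int))
      = (((PySem.Dict.mk graph).values.flatMap id).foldl (fun d n => d.modify n 0 (· + 1))
        ((PySem.Dict.mk graph).keys.foldl (fun d v => d.insert v 0) (PySem.Dict.empty : PySem.Dict Int Int))) := by
    rw [foldl_foldl_eq_flatMap, hvals]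
  have hfoldB : (PySem.Dict.mk graph).values.foldl
      (fun d ns => ns.foldl (fun d n => d.modify n 0 (· + 1)) d)
      ((PySem.Dict.mk graph).keys.foldl (fun d v => d.insert v 0) (PySem.Dict.empty : PySem.Dict Int Int))
      = (((PySem.Dict.mk graph).values.flatMap id).foldl (fun d n => d.modify n 0 (· + 1))
        ((PySem.Dict.mk graph).keys.foldl (fun d v => d.insert v 0) (PySem.Dict.empty : PySem.Dict Int Int))) := by
    rw [foldl_foldl_eq_flatMap]
    simp
  have hcount : ∀ x : Int,
      ((((PySem.Dict.mk graph).values.flatMap id).foldl (fun d n => d.modify n 0 (· + 1))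
        ((PySem.Dict.mk graph).keys.foldl (fun d v => d.insert v 0) (PySem.Dict.empty : PySem.Dict Int Int)))).getD x 0
      = ((((PySem.Dict.mk graph).values.flatMap id).count x : Int)) := by
    intro x
    rw [PySem.Dict.getD_foldl_modify_add_one]
    rw [getD_foldl_insert_zero x (PySem.Dict.mk graph).keys PySem.Dict.empty (by simp)]
    simp
  -- A's side
  rw [hfoldA, pvMainAuxA (PySem.Dict.mk graph) _ _ hcount graph.length]
  -- B's side: the in-degree dict keeps exactly the original keys (Pre_'s closure), so
  -- '0 in indeg.values()' is 'some key counts 0'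
  rw [hfoldB]
  -- every flattened edge target is a key
  have hLmem : ∀ n ∈ (PySem.Dict.mk graph).values.flatMap id, n ∈ (PySem.Dict.mk graph).keys := by
    intro n hn
    simp only [PySem.Dict.values_mk, List.flatMap_map, id_eq, List.mem_flatMap] at hn
    obtain ⟨p, hp, hnp⟩ := hn
    simpa [PySem.Dict.keys] using hcl p hp n hnp
  have hkeys0 : ((PySem.Dict.mk graph).keys.foldl (fun d v => d.insert v 0) (PySem.Dict.empty : PySem.Dict Int Int)).keys
      = (PySem.Dict.mk graph).keys := by
    rw [PySem.Dict.keys_foldl_insert]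
    simp only [PySem.Dict.keys_empty]
    rw [PySem.Set.update_nil_left]
    exact PySem.Set.ofList_eq_self_of_nodup _ hndk
  have hkeys : ((((PySem.Dict.mk graph).values.flatMap id).foldl (fun d n => d.modify n 0 (· + 1))
        ((PySem.Dict.mk graph).keys.foldl (fun d v => d.insert v 0) (PySem.Dict.empty : PySem.Dict Int Int)))).keys
      = (PySem.Dict.mk graph).keys := by
    rw [PySem.Dict.keys_foldl_modify, hkeys0]
    rw [PySem.Set.update_eq_append_filter]
    have : (PySem.Set.ofList ((PySem.Dict.mk graph).values.flatMap id)).filter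
        (fun y => !(PySem.Set.contains (PySem.Dict.mk graph).keys y)) = [] := by
      rw [List.filter_eq_nil_iff]
      intro n hn
      have : n ∈ (PySem.Dict.mk graph).keys :=
        hLmem n ((PySem.Set.mem_ofList _ _).mp hn)
      simp only [PySem.Dict.keys, List.mem_map] at this
      obtain ⟨p, hp, he⟩ := this
      simp only [Bool.not_eq_true', Bool.not_eq_false]
      refine (PySem.Set.contains_iff _ _).mpr ?_
      simp only [PySem.Dict.keys, List.mem_map]
      exact ⟨p, hp, he⟩
    rw [this, List.append_nil]
  have hvaleq : ((((PySem.Dict.mk graph).values.flatMap id).foldl (fun d n => d.modify n 0 (· + 1))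
        ((PySem.Dict.mk graph).keys.foldl (fun d v => d.insert v 0) (PySem.Dict.empty : PySem.Dict Int Int)))).values
      = (PySem.Dict.mk graph).keys.map
          (fun v => (((PySem.Dict.mk graph).values.flatMap id).count v : Int)) := by
    rw [PySem.Dict.values_eq_map_keys _ (by rw [hkeys]; exact hndk) 0, hkeys]
    exact List.map_congr_left (fun v _ => hcount v)
  rw [hvaleq]
  simp only [List.mem_map, decide_eq_decide]
  constructor
  · rintro ⟨v, hv, h0⟩
    exact ⟨v, hv, by exact_mod_cast h0⟩
  · rintro ⟨v, hv, h0⟩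
    exact ⟨v, hv, by exact_mod_cast h0⟩
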